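-- pv_equiv track=rewrite | github.com/sunceet/rabota1 | block 2/task 2.9.py | max_digit_position
-- ===== SOURCE A (Python) =====
-- def max_digit_position(number):
--     number = str(number)
--     max_digit = 0
--     max_digit_position_from_end = 0
--     max_digit_position_from_start = 0
--
--     for i in range(len(number)):
--         digit = int(number[i])
--         if digit > max_digit:
--             max_digit = digit
--             max_digit_position_from_end = len(number) - i
--         if digit >= max_digit:
--             max_digit_position_from_start = i + 1
--
--     return max_digit_position_from_end, max_digit_position_from_start
-- ===== SOURCE B (Python) =====
-- def max_digit_position(number):
--     # Aggregate-first: compute the max digit once, then locate its first and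
--     # last occurrences with separate index scans (no running-max state).
--     digits = [int(c) for c in str(number)]
--     m = max(digits)
--     first = digits.index(m)
--     last = len(digits) - 1 - digits[::-1].index(m)
--     return len(digits) - first, last + 1
-- ===== Notes on version B (the rewrite author's own statement) =====
-- stated objective: simpler
-- what changed: Instead of one indexed loop threading a running max and two position accumulators, B computes the digit list, takes max(digits) once, and finds the first/last occurrence by index scans (digits.index and a reversed index).
-- intended difference: For number == 0, A returns from_end 0 (its running max never exceeds the initial 0, so the from-end position is never set) while B returns the true from-end position of the max digit; both agree on the from-start position. — e.g. on max_digit_position(0): A returns (0, 1), B returns (1, 1)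
import Mathlib
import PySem

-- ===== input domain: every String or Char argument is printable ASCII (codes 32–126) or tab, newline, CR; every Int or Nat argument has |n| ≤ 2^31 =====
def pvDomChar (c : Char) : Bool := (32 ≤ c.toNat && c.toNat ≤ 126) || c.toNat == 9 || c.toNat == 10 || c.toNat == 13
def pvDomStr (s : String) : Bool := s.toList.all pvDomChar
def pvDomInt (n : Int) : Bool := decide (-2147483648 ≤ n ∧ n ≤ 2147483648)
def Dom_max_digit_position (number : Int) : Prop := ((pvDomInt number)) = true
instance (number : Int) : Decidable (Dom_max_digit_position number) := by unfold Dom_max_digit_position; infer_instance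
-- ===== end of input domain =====

-- B replaces A's single running-max loop by max()-then-index scans; objective: simpler.
-- On number = 0 the two differ (see D_ below); elsewhere on Pre_ they agree.

-- ===== PORT A =====
-- int(<one-char string>); exact wherever Python's int() does not raise (the .getD 0
-- default is only reached outside Pre_, on the '-' sign character).
def pvDigit (c : Char) : Int := (PySem.Int.ofStr? (String.ofList [c])).getD 0

def max_digit_position (number : Int) : Int × Int :=
  let cs := (PySem.Int.toStr number).toList
  let r := (PySem.List.enumerate cs 0).foldl
    (fun (st : Int × Int × Int) (p : Int × Char) =>
      let digit := pvDigit p.2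
      let st1 := if digit > st.1 then (digit, (cs.length : Int) - p.1, st.2.2) else st
      if digit ≥ st1.1 then (st1.1, st1.2.1, p.1 + 1) else st1)
    (0, 0, 0)
  (r.2.1, r.2.2)

-- ===== PORT B =====
def max_digit_position_alt (number : Int) : Int × Int :=
  let digits := (PySem.Int.toStr number).toList.map pvDigit
  let m := (PySem.List.max? digits (fun x => x)).getD 0
  let first := ((PySem.List.index? digits m).getD 0 : Int)
  let rev := (PySem.List.slice? digits none none (-1)).getD []
  let last := (digits.length : Int) - 1 - ((PySem.List.index? rev m).getD 0 : Int)
  ((digits.length : Int) - first, last + 1)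

-- ===== PRECONDITION & SPEC =====
-- Pre_ excludes exactly the negative inputs: str(number) then starts with '-' and
-- int('-') raises ValueError in the Python A (and in B alike).
def Pre_max_digit_position (number : Int) : Prop := 0 ≤ number
instance (number : Int) : Decidable (Pre_max_digit_position number) := by unfold Pre_max_digit_position; infer_instance
def pvWitness_max_digit_position : Int := 35

-- For number == 0, A returns from_end 0 (its running max never exceeds the initial 0, so the from-end position is never set) while B returns the true from-end position of the max digit; both agree on the from-start position.
def D_max_digit_position (number : Int) : Prop := number = 0
instance (number : Int) : Decidable (D_max_digit_position number) := by unfold D_max_digit_position; infer_instance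

def Spec_max_digit_position (number : Int) (out : Int × Int) : Prop := ¬ D_max_digit_position number → out = max_digit_position_alt number
instance (number : Int) (out : Int × Int) : Decidable (Spec_max_digit_position number out) := by unfold Spec_max_digit_position; infer_instance

def pvDiffWitness_max_digit_position : Int := 0
def pvDiffWitnessOut_max_digit_position : (Int × Int) × (Int × Int) := ((0, 1), (1, 1))

-- ===== CLAIM (what is proved, stated in full; the proofs are below) =====
def Claim_unchanged_max_digit_position : Prop := ∀ (number : Int), Dom_max_digit_position number → Pre_max_digit_position number → Spec_max_digit_position number (max_digit_position number)
def Claim_changed_max_digit_position : Prop := Dom_max_digit_position (pvDiffWitness_max_digit_position) ∧ Pre_max_digit_position (pvDiffWitness_max_digit_position) ∧ D_max_digit_position (pvDiffWitness_max_digit_position) ∧ max_digit_position (pvDiffWitness_max_digit_position) = pvDiffWitnessOut_max_digit_position.1 ∧ max_digit_position_alt (pvDiffWitness_max_digit_position) = pvDiffWitnessOut_max_digit_position.2 ∧ pvDiffWitnessOut_max_digit_position.1 ≠ pvDiffWitnessOut_max_digit_position.2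
def Claim_exact_max_digit_position : Prop := ∀ (number : Int), Dom_max_digit_position number → Pre_max_digit_position number → D_max_digit_position number → max_digit_position number ≠ max_digit_position_alt number

-- ===== LEMMAS AND PROOFS =====

theorem pvOptBind_nonneg (o : Option Nat) : 0 ≤ (o.bind fun a => some ((a : Int))).getD 0 := by
  cases o <;> simp

theorem pvDigit_nonneg (c : Char) : 0 ≤ pvDigit c := by
  by_cases h1 : c = '-'
  · subst h1; decide
  by_cases h2 : c = '+'
  · subst h2; decide
  unfold pvDigit PySem.Int.ofStr? PySem.Int.ofChars?
  by_cases hs : PySem.Int.isIntSpace c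
  · simp [hs]
    exact pvOptBind_nonneg _
  · simp [hs, h1, h2]
    exact pvOptBind_nonneg _

theorem pvToDigitsCore_ne_nil (b f n : Nat) (acc : List Char) (h : acc ≠ []) :
    Nat.toDigitsCore b f n acc ≠ [] := by
  induction f generalizing n acc with
  | zero => simpa [Nat.toDigitsCore]
  | succ f ih =>
    simp only [Nat.toDigitsCore]
    split
    · simp
    · exact ih _ _ (by simp)

theorem pvToChars_ne_nil (n : Int) : PySem.Int.toChars n ≠ [] := by
  unfold PySem.Int.toChars
  split
  · simp
  · unfold Nat.toDigits
    simp only [Nat.toDigitsCore]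
    split
    · simp
    · exact pvToDigitsCore_ne_nil _ _ _ _ (by simp)

-- running max of A, with its 0 start
def pvMX (ds : List Int) : Int := ds.foldl max 0

theorem pvMX_append (ds : List Int) (a : Int) : pvMX (ds ++ [a]) = max (pvMX ds) a := by
  simp [pvMX]

theorem pvMX_nonneg (ds : List Int) : 0 ≤ pvMX ds := by
  induction ds using List.reverseRecOn with
  | nil => simp [pvMX]
  | append_singleton ds a ih => rw [pvMX_append]; exact le_max_of_le_left ih

theorem pvLe_MX (ds : List Int) : ∀ d ∈ ds, d ≤ pvMX ds := by
  induction ds using List.reverseRecOn with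
  | nil => simp
  | append_singleton ds a ih =>
    intro d hd
    rw [pvMX_append]
    rcases List.mem_append.1 hd with h | h
    · exact le_max_of_le_left (ih d h)
    · simp at h; simp [h]

theorem pvMX_mem (ds : List Int) : pvMX ds = 0 ∨ pvMX ds ∈ ds := by
  induction ds using List.reverseRecOn with
  | nil => left; simp [pvMX]
  | append_singleton ds a ih =>
    rw [pvMX_append]
    rcases le_total (pvMX ds) a with h | h
    · right; simp [max_eq_right h]
    · rw [max_eq_left h]
      rcases ih with h0 | hm
      · left; exact h0
      · right; exact List.mem_append.2 (Or.inl hm)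

theorem pvMX_mem_of_ne_nil (ds : List Int) (hne : ds ≠ []) (hnn : ∀ d ∈ ds, 0 ≤ d) :
    pvMX ds ∈ ds := by
  rcases pvMX_mem ds with h0 | hm
  · cases ds with
    | nil => exact absurd rfl hne
    | cons x t =>
      have h1 : x ≤ pvMX (x :: t) := pvLe_MX _ x (by simp)
      have h2 : 0 ≤ x := hnn x (by simp)
      rw [h0] at h1
      have : x = 0 := le_antisymm h1 h2
      rw [h0, ← this]; simp
  · exact hm

-- the leading (most significant) digit of a nonzero Nat is ≥ 1
theorem pvToDigitsCore_head (f n : Nat) (acc : List Char) (h0 : n ≠ 0) (hf : n ≤ f) :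
    ∃ d rest, Nat.toDigitsCore 10 f n acc = d :: rest ∧ 1 ≤ pvDigit d := by
  induction f generalizing n acc with
  | zero => omega
  | succ f ih =>
    simp only [Nat.toDigitsCore]
    by_cases hd : n / 10 = 0
    · have hlt : n < 10 := by omega
      refine ⟨(n % 10).digitChar, acc, by simp [hd], ?_⟩
      have hm : n % 10 = n := Nat.mod_eq_of_lt hlt
      rw [hm]
      interval_cases n <;> simp_all <;> decide
    · simp only [if_neg hd]
      exact ih (n / 10) _ hd (by omega)

theorem pvMX_toChars_pos (n : Int) (h : 0 < n) :
    1 ≤ pvMX ((PySem.Int.toChars n).map pvDigit) := by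
  have hne : n.toNat ≠ 0 := by omega
  obtain ⟨d, rest, heq, hd⟩ :=
    pvToDigitsCore_head (n.toNat + 1) n.toNat [] hne (by omega)
  have hcs : PySem.Int.toChars n = d :: rest := by
    unfold PySem.Int.toChars
    rw [if_neg (by omega)]
    unfold Nat.toDigits
    exact heq
  calc (1 : Int) ≤ pvDigit d := hd
    _ ≤ pvMX ((PySem.Int.toChars n).map pvDigit) :=
        pvLe_MX _ _ (by rw [hcs]; simp)

-- A's loop body, after the digit has been extracted
def pvStepA (L : Int) (st : Int × Int × Int) (p : Int × Int) : Int × Int × Int :=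
  let st1 := if p.2 > st.1 then (p.2, L - p.1, st.2.2) else st
  if p.2 ≥ st1.1 then (st1.1, st1.2.1, p.1 + 1) else st1

theorem pvEnumerate_map {α β : Type} (f : α → β) (cs : List α) (s : Int) :
    PySem.List.enumerate (cs.map f) s = (PySem.List.enumerate cs s).map (fun p => (p.1, f p.2)) := by
  induction cs generalizing s with
  | nil => simp [PySem.List.enumerate_nil]
  | cons c cs ih => simp [PySem.List.enumerate_cons, ih]

theorem pvFoldA_spec (L : Int) (ds : List Int) (h : ∀ d ∈ ds, 0 ≤ d) :
    (PySem.List.enumerate ds 0).foldl (pvStepA L) (0, 0, 0) =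
      (pvMX ds,
       (if pvMX ds = 0 then 0 else L - (ds.idxOf (pvMX ds) : Int)),
       (if ds = [] then 0 else ((ds.length : Int) - 1 - (ds.reverse.idxOf (pvMX ds) : Int)) + 1)) := by
  induction ds using List.reverseRecOn with
  | nil => simp [PySem.List.enumerate_nil, pvMX]
  | append_singleton ds a ih =>
    have hds : ∀ d ∈ ds, 0 ≤ d := fun d hd => h d (List.mem_append.2 (Or.inl hd))
    have ha : 0 ≤ a := h a (by simp)
    rw [PySem.List.enumerate_append, List.foldl_append, ih hds]
    simp only [PySem.List.enumerate_cons, PySem.List.enumerate_nil,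
      List.foldl_cons, List.foldl_nil, pvMX_append]
    unfold pvStepA
    by_cases hgt : a > pvMX ds
    · have hnotmem : a ∉ ds := fun hm => absurd (pvLe_MX ds a hm) (not_le.2 hgt)
      have hpos : ¬ max (pvMX ds) a = 0 := by
        have := pvMX_nonneg ds; omega
      have hidx : (ds ++ [a]).idxOf a = ds.length := by
        rw [List.idxOf_append]; simp [List.idxOf_eq_length_iff.2 hnotmem]
      have ha0 : a ≠ 0 := by have := pvMX_nonneg ds; omega
      simp only [if_pos hgt, max_eq_right (le_of_lt hgt)]
      simp [hidx, List.reverse_append, ha0]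
    · have hle : a ≤ pvMX ds := not_lt.1 hgt
      rw [max_eq_left hle]
      simp only [if_neg hgt]
      by_cases heq : a ≥ pvMX ds
      · have haeq : a = pvMX ds := le_antisymm hle heq
        have hfst : (if pvMX ds = 0 then (0 : Int) else L - ((ds ++ [a]).idxOf (pvMX ds) : Int)) =
            (if pvMX ds = 0 then (0 : Int) else L - (ds.idxOf (pvMX ds) : Int)) := by
          by_cases h0 : pvMX ds = 0
          · simp [h0]
          · have hmem : pvMX ds ∈ ds := (pvMX_mem ds).resolve_left h0
            rw [List.idxOf_append_of_mem hmem]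
        simp only [if_pos heq]
        rw [← hfst]
        simp [List.reverse_append, haeq]
      · have hlt : a < pvMX ds := lt_of_le_of_ne hle (fun hc => heq (le_of_eq hc.symm))
        have h0 : ¬ pvMX ds = 0 := by omega
        have hmem : pvMX ds ∈ ds := (pvMX_mem ds).resolve_left h0
        have hne : ds ≠ [] := by rintro rfl; exact h0 (by simp [pvMX])
        have hanem : a ≠ pvMX ds := ne_of_lt hlt
        simp only [if_neg heq, if_neg h0, List.idxOf_append_of_mem hmem,
          if_neg (by simp : ¬ ds ++ [a] = []), if_neg hne, List.reverse_append]
        have hrid : (a :: ds.reverse).idxOf (pvMX ds) = ds.reverse.idxOf (pvMX ds) + 1 := by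
          simp [List.idxOf_cons, beq_eq_false_iff_ne.mpr hanem]
        simp only [List.reverse_singleton, List.singleton_append, hrid, List.length_append,
          List.length_singleton]
        push_cast
        ring_nf

theorem pvIdxOf?_eq (l : List Int) (v : Int) (h : v ∈ l) : l.idxOf? v = some (l.idxOf v) := by
  induction l with
  | nil => simp at h
  | cons x t ih =>
    by_cases hx : x = v
    · subst hx; simp [List.idxOf?_cons]
    · rcases List.mem_cons.1 h with h1 | h2
      · exact absurd h1.symm hx
      · simp [List.idxOf?_cons, List.idxOf_cons, beq_eq_false_iff_ne.mpr hx, ih h2]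

-- ===== VERDICT (by name: the statements are the Claim_ definitions above) =====
theorem max_digit_position_spec : Claim_unchanged_max_digit_position := by
  intro number hdom hpre hnd
  have hpos : 0 < number := by
    rcases lt_or_eq_of_le hpre with h | h
    · exact h
    · exact absurd h.symm hnd
  unfold max_digit_position max_digit_position_alt
  set cs := (PySem.Int.toStr number).toList with hcs
  set ds := cs.map pvDigit with hds
  have hcsne : cs ≠ [] := by
    rw [hcs, PySem.Int.toList_toStr]; exact pvToChars_ne_nil number
  have hnn : ∀ d ∈ ds, 0 ≤ d := by
    intro d hd; rcases List.mem_map.1 hd with ⟨c, _, rfl⟩; exact pvDigit_nonneg c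
  have hdsne : ds ≠ [] := by simp [hds, hcsne]
  have hmx1 : 1 ≤ pvMX ds := by
    have := pvMX_toChars_pos number hpos
    rw [hds, hcs, PySem.Int.toList_toStr]
    exact this
  have hmx0 : ¬ pvMX ds = 0 := by omega
  have hAfold : (PySem.List.enumerate cs 0).foldl
      (fun (st : Int × Int × Int) (p : Int × Char) =>
        let digit := pvDigit p.2
        let st1 := if digit > st.1 then (digit, (cs.length : Int) - p.1, st.2.2) else st
        if digit ≥ st1.1 then (st1.1, st1.2.1, p.1 + 1) else st1)
      (0, 0, 0)
      = (pvMX ds,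
         (if pvMX ds = 0 then 0 else (cs.length : Int) - (ds.idxOf (pvMX ds) : Int)),
         (if ds = [] then 0 else ((ds.length : Int) - 1 - (ds.reverse.idxOf (pvMX ds) : Int)) + 1)) := by
    rw [← pvFoldA_spec (cs.length : Int) ds hnn, hds, pvEnumerate_map, List.foldl_map]
    rfl
  have hmem : pvMX ds ∈ ds := pvMX_mem_of_ne_nil ds hdsne hnn
  have hmax : (PySem.List.max? ds (fun x => x)).getD 0 = pvMX ds := by
    cases hd : ds with
    | nil => exact absurd hd hdsne
    | cons x t =>
      have hx : 0 ≤ x := hnn x (by rw [hd]; simp)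
      rw [PySem.List.max?_id_cons]
      simp [pvMX, max_eq_right hx]
  have hidx1 : (PySem.List.index? ds (pvMX ds)).getD 0 = ds.idxOf (pvMX ds) := by
    rw [PySem.List.index?_eq_idxOf?, pvIdxOf?_eq ds _ hmem]; rfl
  have hmemr : pvMX ds ∈ ds.reverse := List.mem_reverse.2 hmem
  have hidx2 : (PySem.List.index? ds.reverse (pvMX ds)).getD 0 = ds.reverse.idxOf (pvMX ds) := by
    rw [PySem.List.index?_eq_idxOf?, pvIdxOf?_eq ds.reverse _ hmemr]; rfl
  have hrev : (PySem.List.slice? ds none none (-1)).getD [] = ds.reverse := by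
    rw [PySem.List.slice?_none_none_neg_one]; rfl
  have hlen : ds.length = cs.length := by rw [hds]; simp
  simp only [hAfold, hmax, hrev, hidx1, hidx2, if_neg hdsne, if_neg hmx0, hlen]

theorem max_digit_position_changed : Claim_changed_max_digit_position := by
  unfold Claim_changed_max_digit_position; decide

theorem max_digit_position_tight : Claim_exact_max_digit_position := by
  intro number hdom hpre hd
  unfold D_max_digit_position at hd
  subst hd
  decide
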